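-- pv_equiv track=rewrite | github.com/OFS/opae-sdk | binaries/hssi/ethernet/hssicommon.py | register_field_set
-- ===== SOURCE A (Python) =====
-- def register_field_set(reg_data, idx, width, value):
--     mask = 0
--     for x in range(width):
--         mask |= (1 << x)
--     value &= mask
--     reg_data &= ~(mask << idx)
--     reg_data |= (value << idx)
--     return reg_data
-- ===== SOURCE B (Python) =====
-- def register_field_set(reg_data, idx, width, value):
--     # Set the field one bit at a time: clear bit idx, copy in value's low bit,
--     # then move on to the next bit position.
--     while width > 0:
--         reg_data = (reg_data & ~(1 << idx)) | ((value & 1) << idx)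
--         idx += 1
--         width -= 1
--         value >>= 1
--     return reg_data
-- ===== Notes on version B (the rewrite author's own statement) =====
-- stated objective: alternative
-- what changed: Instead of building a width-bit mask and splicing the whole field with three bitwise operations, B walks the field one bit at a time, clearing each target bit and copying in the corresponding bit of value; on huge widths this does more big-integer work per step than A's bulk splice.
import Mathlib
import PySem

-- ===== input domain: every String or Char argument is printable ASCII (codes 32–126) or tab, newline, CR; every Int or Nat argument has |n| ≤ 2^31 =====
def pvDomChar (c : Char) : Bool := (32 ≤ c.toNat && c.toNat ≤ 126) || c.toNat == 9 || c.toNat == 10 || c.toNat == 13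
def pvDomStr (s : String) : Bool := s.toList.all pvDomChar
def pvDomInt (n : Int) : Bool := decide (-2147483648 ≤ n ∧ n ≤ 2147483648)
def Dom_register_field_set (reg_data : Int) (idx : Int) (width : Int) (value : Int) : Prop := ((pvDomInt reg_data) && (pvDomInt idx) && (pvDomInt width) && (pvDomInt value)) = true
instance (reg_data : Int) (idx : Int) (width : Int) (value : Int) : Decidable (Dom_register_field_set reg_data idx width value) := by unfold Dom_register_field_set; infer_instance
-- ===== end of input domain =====

-- B replaces A's mask-and-splice (build a width-bit mask, clear the field, OR the value in)
-- by a per-bit loop that clears and copies one bit per step: a different algorithm of the same cost.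

-- ===== PORT A =====
-- the loop 'for x in range(width): mask |= (1 << x)'; x ∈ range(width) is nonnegative, so x.toNat is exact
def register_field_set (reg_data : Int) (idx : Int) (width : Int) (value : Int) : Int :=
  let mask : Int := (PySem.List.pyRange 0 width 1).foldl (fun m x => PySem.Int.bor m (1 <<< x.toNat)) 0
  let value := PySem.Int.band value mask
  let reg_data := PySem.Int.band reg_data (Int.not (mask <<< idx.toNat))
  let reg_data := PySem.Int.bor reg_data (value <<< idx.toNat)
  reg_data

-- ===== PORT B =====
-- Source B's while loop, which runs width times (never, if width <= 0), as structural
-- recursion on the remaining iteration count; Python's 'value >> 1' is Int's arithmetic '>>> 1'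
def rfsAltLoop : Nat → Int → Int → Int → Int
  | 0, reg_data, _, _ => reg_data
  | n + 1, reg_data, idx, value =>
      rfsAltLoop n
        (PySem.Int.bor (PySem.Int.band reg_data (Int.not ((1 : Int) <<< idx.toNat)))
          ((PySem.Int.band value 1) <<< idx.toNat))
        (idx + 1) (value >>> (1 : Nat))

def register_field_set_alt (reg_data : Int) (idx : Int) (width : Int) (value : Int) : Int :=
  rfsAltLoop width.toNat reg_data idx value

-- ===== PRECONDITION & SPEC =====
-- Pre_ excludes idx < 0, on which Python A raises ValueError (negative shift count).
def Pre_register_field_set (reg_data : Int) (idx : Int) (width : Int) (value : Int) : Prop := 0 ≤ idx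
instance (reg_data : Int) (idx : Int) (width : Int) (value : Int) : Decidable (Pre_register_field_set reg_data idx width value) := by unfold Pre_register_field_set; infer_instance
def pvWitness_register_field_set : Int × Int × Int × Int := (255, 4, 3, 5)

def Spec_register_field_set (reg_data : Int) (idx : Int) (width : Int) (value : Int) (out : Int) : Prop := out = register_field_set_alt reg_data idx width value
instance (reg_data : Int) (idx : Int) (width : Int) (value : Int) (out : Int) : Decidable (Spec_register_field_set reg_data idx width value out) := by unfold Spec_register_field_set; infer_instance

-- ===== CLAIM (what is proved, stated in full; the proofs are below) =====
def Claim_equal_register_field_set : Prop := ∀ (reg_data : Int) (idx : Int) (width : Int) (value : Int), Dom_register_field_set reg_data idx width value → Pre_register_field_set reg_data idx width value → Spec_register_field_set reg_data idx width value (register_field_set reg_data idx width value)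

-- ===== LEMMAS AND PROOFS =====

-- ---- an Int testBit toolkit (Mathlib has the Nat side; the Int side is built here) ----

lemma intTestBit_ofNat (m : Nat) (i : Nat) : (Int.ofNat m).testBit i = m.testBit i := rfl
lemma intTestBit_coe (m i : Nat) : ((m : Int)).testBit i = m.testBit i := rfl
lemma intTestBit_negSucc (m : Nat) (i : Nat) : (Int.negSucc m).testBit i = !(m.testBit i) := rfl

lemma int_eq_of_testBit_eq {a b : Int} (h : ∀ i, a.testBit i = b.testBit i) : a = b := by
  have big : ∀ m n : Nat, (Int.ofNat m).testBit (m + n) = false := by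
    intro m n
    rw [intTestBit_ofNat]
    exact Nat.testBit_lt_two_pow (lt_of_lt_of_le (Nat.lt_two_pow_self)
      (Nat.pow_le_pow_right (by norm_num) (Nat.le_add_right _ _)))
  cases a with
  | ofNat m =>
      cases b with
      | ofNat n => exact congrArg _ (Nat.eq_of_testBit_eq fun i => h i)
      | negSucc n =>
          exfalso
          have h1 := h (m + n)
          rw [big m n, intTestBit_negSucc] at h1
          have h2 : n.testBit (m + n) = false :=
            Nat.testBit_lt_two_pow (lt_of_lt_of_le (Nat.lt_two_pow_self)
              (Nat.pow_le_pow_right (by norm_num) (Nat.le_add_left _ _)))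
          rw [h2] at h1; exact Bool.false_ne_true h1
  | negSucc m =>
      cases b with
      | ofNat n =>
          exfalso
          have h1 := h (n + m)
          rw [big n m, intTestBit_negSucc] at h1
          have h2 : m.testBit (n + m) = false :=
            Nat.testBit_lt_two_pow (lt_of_lt_of_le (Nat.lt_two_pow_self)
              (Nat.pow_le_pow_right (by norm_num) (Nat.le_add_left _ _)))
          rw [h2] at h1; exact Bool.false_ne_true h1.symm
      | negSucc n =>
          have : m = n := Nat.eq_of_testBit_eq fun i => by
            have h1 := h i; rw [intTestBit_negSucc, intTestBit_negSucc] at h1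
            exact Bool.not_inj h1
          rw [this]

lemma tb_not (a : Int) (i : Nat) : (Int.not a).testBit i = !(a.testBit i) := by
  cases a with
  | ofNat m => rfl
  | negSucc m =>
      rw [show Int.not (Int.negSucc m) = Int.ofNat m from rfl, intTestBit_ofNat,
        intTestBit_negSucc, Bool.not_not]

-- Nat helper: m - (m &&& n) keeps exactly the bits of m not in n
lemma sub_land_eq_ldiff (m n : Nat) : m - (m &&& n) = Nat.ldiff m n := by
  induction m using Nat.binaryRec generalizing n with
  | zero => simp [Nat.ldiff]
  | bit b m ih =>
      obtain ⟨b', n', rfl⟩ : ∃ b' n', n = Nat.bit b' n' :=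
        ⟨n.testBit 0, n >>> 1, (Nat.bit_testBit_zero_shiftRight_one n).symm⟩
      rw [Nat.land_bit, Nat.ldiff_bit, ← ih n']
      have hle : m &&& n' ≤ m := Nat.and_le_left
      simp only [Nat.bit_val]
      cases b <;> cases b' <;> simp <;> omega

lemma neg_coe_sub_one (x : Nat) : -(x : Int) - 1 = Int.negSucc x := by
  rw [Int.negSucc_eq]; ring

lemma tb_band (a b : Int) (i : Nat) :
    (PySem.Int.band a b).testBit i = (a.testBit i && b.testBit i) := by
  cases a with
  | ofNat m =>
      cases b with
      | ofNat n =>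
          simp only [PySem.Int.band]
          simp [intTestBit_coe]
      | negSucc n =>
          rw [show PySem.Int.band (Int.ofNat m) (Int.negSucc n)
              = Int.ofNat (m - (m &&& n)) by
            simp [PySem.Int.band]]
          rw [intTestBit_ofNat, sub_land_eq_ldiff, Nat.testBit_ldiff,
            intTestBit_ofNat, intTestBit_negSucc]
  | negSucc m =>
      cases b with
      | ofNat n =>
          rw [show PySem.Int.band (Int.negSucc m) (Int.ofNat n)
              = Int.ofNat (n - (n &&& m)) by
            simp [PySem.Int.band]]
          rw [intTestBit_ofNat, sub_land_eq_ldiff, Nat.testBit_ldiff,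
            intTestBit_ofNat, intTestBit_negSucc, Bool.and_comm]
      | negSucc n =>
          rw [show PySem.Int.band (Int.negSucc m) (Int.negSucc n)
              = Int.negSucc (m ||| n) by
            simp [PySem.Int.band, neg_coe_sub_one]]
          rw [intTestBit_negSucc, Nat.testBit_lor, intTestBit_negSucc, intTestBit_negSucc]
          simp

lemma tb_bor (a b : Int) (i : Nat) :
    (PySem.Int.bor a b).testBit i = (a.testBit i || b.testBit i) := by
  cases a with
  | ofNat m =>
      cases b with
      | ofNat n =>
          simp only [PySem.Int.bor]
          simp [intTestBit_coe]
      | negSucc n =>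
          rw [show PySem.Int.bor (Int.ofNat m) (Int.negSucc n)
              = Int.negSucc (n - (n &&& m)) by
            simp [PySem.Int.bor, neg_coe_sub_one]]
          rw [intTestBit_negSucc, sub_land_eq_ldiff, Nat.testBit_ldiff,
            intTestBit_ofNat, intTestBit_negSucc]
          cases m.testBit i <;> cases n.testBit i <;> rfl
  | negSucc m =>
      cases b with
      | ofNat n =>
          rw [show PySem.Int.bor (Int.negSucc m) (Int.ofNat n)
              = Int.negSucc (m - (m &&& n)) by
            simp [PySem.Int.bor, neg_coe_sub_one]]
          rw [intTestBit_negSucc, sub_land_eq_ldiff, Nat.testBit_ldiff,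
            intTestBit_ofNat, intTestBit_negSucc]
          cases m.testBit i <;> cases n.testBit i <;> rfl
      | negSucc n =>
          rw [show PySem.Int.bor (Int.negSucc m) (Int.negSucc n)
              = Int.negSucc (m &&& n) by
            simp [PySem.Int.bor, neg_coe_sub_one]]
          rw [intTestBit_negSucc, Nat.testBit_land, intTestBit_negSucc, intTestBit_negSucc]
          cases m.testBit i <;> cases n.testBit i <;> rfl

-- Nat helper for shifting a negative: the low k bits of (n+1)·2^k − 1 are ones, the rest are n's
lemma tb_pred_shl (n k : Nat) : ∀ i : Nat,
    ((n + 1) <<< k - 1).testBit i = (decide (i < k) || (decide (k ≤ i) && n.testBit (i - k))) := by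
  induction k with
  | zero => intro i; simp
  | succ k ih =>
      intro i
      have hb : (n + 1) <<< (k + 1) - 1 = 2 * ((n + 1) <<< k - 1) + 1 := by
        rw [Nat.shiftLeft_succ]
        have : 1 ≤ (n + 1) <<< k := by
          rw [Nat.shiftLeft_eq]
          exact Nat.mul_pos (by omega) (Nat.two_pow_pos k)
        omega
      rw [hb]
      cases i with
      | zero => simp [Nat.testBit_zero]
      | succ j =>
          rw [Nat.testBit_add_one]
          have : (2 * ((n + 1) <<< k - 1) + 1) / 2 = (n + 1) <<< k - 1 := by omega
          rw [this, ih j]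
          have h1 : (decide (j < k)) = (decide (j + 1 < k + 1)) := by simp
          have h2 : (decide (k ≤ j)) = (decide (k + 1 ≤ j + 1)) := by simp
          have h3 : j - k = j + 1 - (k + 1) := by omega
          rw [h1, h2, h3]

lemma tb_shl (a : Int) (k i : Nat) :
    (a <<< k).testBit i = (decide (k ≤ i) && a.testBit (i - k)) := by
  cases a with
  | ofNat m =>
      rw [show (Int.ofNat m <<< k) = Int.ofNat (m <<< k) from rfl, intTestBit_ofNat,
        intTestBit_ofNat, Nat.testBit_shiftLeft]
  | negSucc m =>
      rw [show (Int.negSucc m <<< k) = Int.negSucc ((m + 1) <<< k - 1) from rfl,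
        intTestBit_negSucc, tb_pred_shl, intTestBit_negSucc]
      by_cases h : k ≤ i
      · simp [h, Nat.not_lt.mpr h]
      · simp [h, Nat.lt_of_not_le h]

lemma tb_shr (a : Int) (k i : Nat) : (a >>> k).testBit i = a.testBit (k + i) := by
  cases a with
  | ofNat m =>
      rw [show (Int.ofNat m >>> k) = Int.ofNat (m >>> k) from rfl, intTestBit_ofNat,
        intTestBit_ofNat, Nat.testBit_shiftRight]
  | negSucc m =>
      rw [show (Int.negSucc m >>> k) = Int.negSucc (m >>> k) from rfl, intTestBit_negSucc,
        intTestBit_negSucc, Nat.testBit_shiftRight]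

lemma tb_mask (n i : Nat) : ((((2 ^ n - 1 : Nat)) : Int)).testBit i = decide (i < n) := by
  rw [intTestBit_coe]
  exact Nat.testBit_two_pow_sub_one n i

lemma tb_one (j : Nat) : (1 : Int).testBit j = decide (j = 0) := by
  have := tb_mask 1 j
  norm_num at this
  exact this

-- ---- both ports compute the same mask-and-splice closed form ----

def fieldSplice (r : Int) (i n : Nat) (v : Int) : Int :=
  PySem.Int.bor (PySem.Int.band r (Int.not ((((2 ^ n - 1 : Nat)) : Int) <<< i)))
    ((PySem.Int.band v (((2 ^ n - 1 : Nat)) : Int)) <<< i)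

lemma or_pred_two_pow (k : Nat) : (2 ^ k - 1) ||| 2 ^ k = 2 ^ (k + 1) - 1 := by
  apply Nat.eq_of_testBit_eq
  intro i
  simp only [Nat.testBit_lor, Nat.testBit_two_pow_sub_one, Nat.testBit_two_pow]
  by_cases h : i < k <;> by_cases h2 : k = i <;> simp_all <;> omega

lemma a_mask_loop (n : Nat) :
    (PySem.List.pyRange 0 (n : Int) 1).foldl (fun m x => PySem.Int.bor m (1 <<< x.toNat)) 0
      = (((2 ^ n - 1 : Nat)) : Int) := by
  induction n with
  | zero => simp
  | succ k ih =>
      rw [show ((k + 1 : Nat) : Int) = (k : Int) + 1 by push_cast; ring,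
        PySem.List.pyRange_one_succ_right (by positivity)]
      rw [List.foldl_append, ih]
      simp only [List.foldl_cons, List.foldl_nil, Int.toNat_natCast]
      rw [PySem.Int.bor_natCast]
      rw [Nat.one_shiftLeft, or_pred_two_pow]

lemma mask_eq_forall (w : Int) :
    (PySem.List.pyRange 0 w 1).foldl (fun m x => PySem.Int.bor m (1 <<< x.toNat)) 0
      = (((2 ^ w.toNat - 1 : Nat)) : Int) := by
  rcases le_or_gt w 0 with h | h
  · have he : PySem.List.pyRange 0 w 1 = [] := by
      rw [PySem.List.pyRange_one]; simp; omega
    rw [he, show w.toNat = 0 by omega]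
    simp
  · conv_lhs => rw [show w = ((w.toNat : Nat) : Int) by omega]
    exact a_mask_loop w.toNat

lemma a_eq_splice (r i w v : Int) :
    register_field_set r i w v = fieldSplice r i.toNat w.toNat v := by
  unfold register_field_set fieldSplice
  rw [mask_eq_forall]

lemma splice_step (r v : Int) (i n : Nat) :
    fieldSplice
      (PySem.Int.bor (PySem.Int.band r (Int.not ((1 : Int) <<< i)))
        ((PySem.Int.band v 1) <<< i)) (i + 1) n (v >>> (1 : Nat))
      = fieldSplice r i (n + 1) v := by
  apply int_eq_of_testBit_eq
  intro j
  simp only [fieldSplice, tb_bor, tb_band, tb_not, tb_shl, tb_shr, tb_mask, tb_one]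
  rcases lt_trichotomy j i with h | h | h
  · have h1 : ¬ i ≤ j := by omega
    have h2 : ¬ i + 1 ≤ j := by omega
    simp [h1, h2]
  · subst h
    have h1 : ¬ j + 1 ≤ j := by omega
    simp [h1]
  · have h1 : i ≤ j := by omega
    have h2 : i + 1 ≤ j := by omega
    have e : 1 + (j - (i + 1)) = j - i := by omega
    have e2 : (decide (j - (i + 1) < n)) = (decide (j - i < n + 1)) := by
      rw [decide_eq_decide]; omega
    have e3 : ¬ j - i = 0 := by omega
    simp [h1, h2, e, e2, e3]

lemma splice_zero (r : Int) (i : Nat) (v : Int) : fieldSplice r i 0 v = r := by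
  unfold fieldSplice
  norm_num
  simp [show Int.not 0 = -1 from rfl]

lemma alt_loop_eq_splice : ∀ (n : Nat) (r i v : Int), 0 ≤ i →
    rfsAltLoop n r i v = fieldSplice r i.toNat n v := by
  intro n
  induction n with
  | zero =>
      intro r i v _
      rw [rfsAltLoop, splice_zero]
  | succ k ih =>
      intro r i v hi
      rw [rfsAltLoop, ih _ (i + 1) _ (by omega)]
      rw [show (i + 1).toNat = i.toNat + 1 by omega]
      exact splice_step r v i.toNat k

-- ===== VERDICT (by name: the statement is the Claim_ definition above) =====
theorem register_field_set_spec : Claim_equal_register_field_set := by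
  intro r i w v _ hpre
  unfold Spec_register_field_set
  unfold register_field_set_alt
  rw [a_eq_splice r i w v, alt_loop_eq_splice w.toNat r i v hpre]
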